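-- pv_equiv track=rewrite | github.com/Rafael-Sapienza/computacao | programas/1Semestre/XI_Maratona_Unb_Programacao/test3.py | ondeEstaoAsAspas
-- ===== SOURCE A (Python) =====
-- def ondeEstaoAsAspas(stringOriginal):
--     simboloDePontuacao = ['.',',']
--     posicaoAspasSemPar = []
--     posicaoAspasComPar = []
--     errosDePontuacao = []
--     for i,item in enumerate(stringOriginal):
--         if item == '"':
--             posicaoAspasSemPar.append(i)
--             if i >= 1:
--                 if stringOriginal[i-1] != ' ':
--                     errosDePontuacao.append(i)
--
--             if len(posicaoAspasSemPar) == 2: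
--                 posicaoAspasComPar.append(posicaoAspasSemPar)
--                 if i >= 1:
--                     if stringOriginal[i-1] in simboloDePontuacao:
--                         errosDePontuacao.append(i)
--                 posicaoAspasSemPar = []
--     return posicaoAspasComPar,posicaoAspasSemPar,errosDePontuacao
-- ===== SOURCE B (Python) =====
-- def _pairUp(qs):
--     if len(qs) >= 2:
--         pairs, rest = _pairUp(qs[2:])
--         return [[qs[0], qs[1]]] + pairs, rest
--     return [], qs
--
-- def _errOpen(s, p):
--     return [p] if p >= 1 and s[p-1] != ' ' else []
--
-- def _errClose(s, p):
--     return _errOpen(s, p) + ([p] if p >= 1 and s[p-1] in ['.', ','] else [])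
--
-- def _errs(s, qs):
--     if len(qs) >= 2:
--         return _errOpen(s, qs[0]) + _errClose(s, qs[1]) + _errs(s, qs[2:])
--     if len(qs) == 1:
--         return _errOpen(s, qs[0])
--     return []
--
-- def ondeEstaoAsAspas(stringOriginal):
--     qs = [i for i, c in enumerate(stringOriginal) if c == '"']
--     pairs, rest = _pairUp(qs)
--     return pairs, rest, _errs(stringOriginal, qs)
-- ===== Notes on version B (the rewrite author's own statement) =====
-- stated objective: alternative
-- what changed: Replaced A's single-pass state machine (pending-pair buffer reset every two quotes) by a two-phase decomposition: collect all quote indices first, then pair them up and derive the punctuation-error list by recursion on that index list.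
import Mathlib
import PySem

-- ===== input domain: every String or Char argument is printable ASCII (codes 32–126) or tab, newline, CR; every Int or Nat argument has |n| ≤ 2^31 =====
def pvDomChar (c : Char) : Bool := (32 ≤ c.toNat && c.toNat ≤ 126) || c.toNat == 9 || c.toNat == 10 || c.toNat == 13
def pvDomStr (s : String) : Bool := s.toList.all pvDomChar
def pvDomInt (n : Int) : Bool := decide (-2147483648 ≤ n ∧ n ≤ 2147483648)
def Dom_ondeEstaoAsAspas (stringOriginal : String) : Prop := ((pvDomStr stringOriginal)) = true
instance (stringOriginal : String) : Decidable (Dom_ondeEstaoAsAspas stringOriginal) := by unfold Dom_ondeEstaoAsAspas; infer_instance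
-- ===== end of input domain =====

-- B rebuilds the result in two phases (collect quote indices, then pair them up and
-- derive the punctuation errors by recursion on that index list) instead of A's
-- single-pass state machine; objective: alternative decomposition, same cost.

-- ===== PORT A =====
-- one loop iteration of A (state = (posicaoAspasComPar, posicaoAspasSemPar, errosDePontuacao))
def pvStepA (cs : List Char) (st : List (List Int) × List Int × List Int) (p : Int × Char) :
    List (List Int) × List Int × List Int :=
  match st, p with
  | (comPar, semPar, erros), (i, item) =>
    if item = '"' then
      let semPar' := semPar ++ [i]
      let erros' :=
        if 1 ≤ i then
          (if PySem.List.pyGetD cs (i - 1) ' ' ≠ ' ' then erros ++ [i] else erros)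
        else erros
      if semPar'.length = 2 then
        (comPar ++ [semPar'], [],
          if 1 ≤ i then
            (if PySem.List.pyGetD cs (i - 1) ' ' ∈ ['.', ','] then erros' ++ [i] else erros')
          else erros')
      else (comPar, semPar', erros')
    else (comPar, semPar, erros)

def ondeEstaoAsAspas (stringOriginal : String) : List (List Int) × List Int × List Int :=
  let cs := stringOriginal.toList
  (PySem.List.enumerate cs 0).foldl (pvStepA cs) ([], [], [])

-- ===== PORT B =====
def pvPairUp : List Int → List (List Int) × List Int
  | a :: b :: t => let pr := pvPairUp t; ([a, b] :: pr.1, pr.2)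
  | l => ([], l)

def pvErrOpen (cs : List Char) (p : Int) : List Int :=
  if 1 ≤ p ∧ PySem.List.pyGetD cs (p - 1) ' ' ≠ ' ' then [p] else []

def pvErrClose (cs : List Char) (p : Int) : List Int :=
  pvErrOpen cs p ++ (if 1 ≤ p ∧ PySem.List.pyGetD cs (p - 1) ' ' ∈ ['.', ','] then [p] else [])

def pvErrs (cs : List Char) : List Int → List Int
  | a :: b :: t => pvErrOpen cs a ++ pvErrClose cs b ++ pvErrs cs t
  | [a] => pvErrOpen cs a
  | [] => []

def ondeEstaoAsAspas_alt (stringOriginal : String) : List (List Int) × List Int × List Int :=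
  let cs := stringOriginal.toList
  let qs := ((PySem.List.enumerate cs 0).filter (fun p => p.2 == '"')).map (·.1)
  let pr := pvPairUp qs
  (pr.1, pr.2, pvErrs cs qs)

-- ===== PRECONDITION & SPEC =====
def Spec_ondeEstaoAsAspas (stringOriginal : String) (out : List (List Int) × List Int × List Int) : Prop := out = ondeEstaoAsAspas_alt stringOriginal
instance (stringOriginal : String) (out : List (List Int) × List Int × List Int) : Decidable (Spec_ondeEstaoAsAspas stringOriginal out) := by unfold Spec_ondeEstaoAsAspas; infer_instance

-- ===== CLAIM (what is proved, stated in full; the proofs are below) =====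
def Claim_equal_ondeEstaoAsAspas : Prop := ∀ (stringOriginal : String), Dom_ondeEstaoAsAspas stringOriginal → Spec_ondeEstaoAsAspas stringOriginal (ondeEstaoAsAspas stringOriginal)

-- ===== LEMMAS AND PROOFS =====

-- quote indices of an enumerated fragment
def pvQuotesL (l : List (Int × Char)) : List Int :=
  (l.filter (fun p => p.2 == '"')).map (·.1)

-- error list when the fragment starts in the "one pending quote" state
def pvErrsOdd (cs : List Char) : List Int → List Int
  | [] => []
  | b :: t => pvErrClose cs b ++ pvErrs cs t

lemma pvErrs_cons (cs : List Char) (a : Int) (qs : List Int) :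
    pvErrs cs (a :: qs) = pvErrOpen cs a ++ pvErrsOdd cs qs := by
  cases qs <;> simp [pvErrs, pvErrsOdd]

lemma pvKey (cs : List Char) (l : List (Int × Char)) :
    (∀ (cp : List (List Int)) (er : List Int),
        l.foldl (pvStepA cs) (cp, [], er) =
          (cp ++ (pvPairUp (pvQuotesL l)).1, (pvPairUp (pvQuotesL l)).2,
            er ++ pvErrs cs (pvQuotesL l))) ∧
    (∀ (cp : List (List Int)) (er : List Int) (x : Int),
        l.foldl (pvStepA cs) (cp, [x], er) =
          (cp ++ (pvPairUp (x :: pvQuotesL l)).1, (pvPairUp (x :: pvQuotesL l)).2,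
            er ++ pvErrsOdd cs (pvQuotesL l))) := by
  induction l with
  | nil =>
      constructor
      · intro cp er; simp [pvQuotesL, pvPairUp, pvErrs]
      · intro cp er x; simp [pvQuotesL, pvPairUp, pvErrsOdd]
  | cons hd tl ih =>
      obtain ⟨ihE, ihO⟩ := ih
      obtain ⟨i, c⟩ := hd
      by_cases hc : c = '"'
      · subst hc
        constructor
        · intro cp er
          have hq : pvQuotesL ((i, '"') :: tl) = i :: pvQuotesL tl := by
            simp [pvQuotesL]
          rw [hq, pvErrs_cons]
          have hstep : pvStepA cs (cp, [], er) (i, '"') = (cp, [i], er ++ pvErrOpen cs i) := by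
            simp [pvStepA, pvErrOpen]; split_ifs <;> simp_all
          simp only [List.foldl_cons, hstep, ihO]
          simp
        · intro cp er x
          have hq : pvQuotesL ((i, '"') :: tl) = i :: pvQuotesL tl := by
            simp [pvQuotesL]
          rw [hq]
          have hstep : pvStepA cs (cp, [x], er) (i, '"') =
              (cp ++ [[x, i]], [], er ++ pvErrClose cs i) := by
            simp [pvStepA, pvErrClose, pvErrOpen]; split_ifs <;> simp_all
          simp only [List.foldl_cons, hstep, ihE]
          simp [pvPairUp, pvErrsOdd]
      · have hq : pvQuotesL ((i, c) :: tl) = pvQuotesL tl := by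
          simp [pvQuotesL, hc]
        have hstep : ∀ (cp : List (List Int)) (sp er : List Int),
            pvStepA cs (cp, sp, er) (i, c) = (cp, sp, er) := by
          intro cp sp er; simp [pvStepA, hc]
        constructor
        · intro cp er; simp only [List.foldl_cons, hstep, hq, ihE]
        · intro cp er x; simp only [List.foldl_cons, hstep, hq, ihO]

-- ===== VERDICT (by name: the statement is the Claim_ definition above) =====
theorem ondeEstaoAsAspas_spec : Claim_equal_ondeEstaoAsAspas := by
  intro s _
  unfold Spec_ondeEstaoAsAspas ondeEstaoAsAspas ondeEstaoAsAspas_alt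
  have h := (pvKey s.toList (PySem.List.enumerate s.toList 0)).1 [] []
  simp only [h, pvQuotesL, List.nil_append]
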